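-- pv_equiv track=rewrite | github.com/Arsen1302/Code-copy-detector | TestData/solutions/problem_1112_5.py | solution_1112_5
-- ===== SOURCE A (Python) =====
-- def solution_1112_5(n: int) -> int:
--     if n <= 1:
--         return n
--     nums = [0, 1]
--     res = 1
--     for k in range(2, n + 1):
--         if k % 2 == 0:
--             nums.append(nums[k // 2])
--         else:
--             nums.append(nums[k // 2] + nums[k // 2 + 1])
--         res = max(res, nums[-1])
--     return res
-- ===== SOURCE B (Python) =====
-- def solution_1112_5(n: int) -> int:
--     if n <= 1:
--         return n
--     memo = {}
--
--     def get(i):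
--         if i < 2:
--             return i
--         if i in memo:
--             return memo[i]
--         if i % 2 == 0:
--             v = get(i // 2)
--         else:
--             v = get(i // 2) + get(i // 2 + 1)
--         memo[i] = v
--         return v
--
--     return max(get(i) for i in range(n + 1))
-- ===== Notes on version B (the rewrite author's own statement) =====
-- stated objective: alternative
-- what changed: Replaces the left-to-right table fill with a running max by a memoized top-down recursion over the binary-halving index structure, taking the max of get(i) over 0..n.
import Mathlib
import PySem

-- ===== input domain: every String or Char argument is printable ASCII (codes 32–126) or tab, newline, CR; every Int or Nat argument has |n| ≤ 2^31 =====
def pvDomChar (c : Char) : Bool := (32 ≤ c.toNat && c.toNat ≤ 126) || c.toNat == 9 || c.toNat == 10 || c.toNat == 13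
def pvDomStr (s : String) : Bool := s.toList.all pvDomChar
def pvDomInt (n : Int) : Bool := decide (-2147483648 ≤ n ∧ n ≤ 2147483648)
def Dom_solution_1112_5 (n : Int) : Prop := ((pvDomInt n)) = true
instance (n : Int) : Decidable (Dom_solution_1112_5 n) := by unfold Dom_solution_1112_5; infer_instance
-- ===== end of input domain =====

-- B replaces the left-to-right table fill by a memoized top-down recursion over the
-- binary-halving index structure (objective: alternative decomposition, same cost).

-- ===== PORT A =====
-- Literal port of A: fold over range(2, n+1) carrying (nums, res).
-- nums[k//2] / nums[k//2+1]: indices are nonnegative and in range on every iteration,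
-- so getD with the cast-to-Nat index is exact (Python raises only out of range, never reached).
def solution_1112_5 (n : Int) : Int :=
  if n ≤ 1 then n
  else
    let s := (PySem.List.pyRange 2 (n + 1) 1).foldl
      (fun (st : List Int × Int) k =>
        let v : Int :=
          if PySem.Int.mod k 2 = 0 then
            st.1.getD (PySem.Int.floordiv k 2).toNat 0
          else
            st.1.getD (PySem.Int.floordiv k 2).toNat 0 +
              st.1.getD ((PySem.Int.floordiv k 2) + 1).toNat 0
        (st.1 ++ [v], max st.2 v))
      ([0, 1], 1)
    s.2

-- ===== PORT B =====
-- Port of Source B's memoized recursive helper get(i): the memo dict is threaded explicitly.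
def pvGet (i : Nat) (memo : PySem.Dict Int Int) : Int × PySem.Dict Int Int :=
  if _h : i < 2 then ((i : Int), memo)
  else
    match memo.get? (i : Int) with
    | some v => (v, memo)
    | none =>
      if i % 2 = 0 then
        let p := pvGet (i / 2) memo
        (p.1, p.2.insert (i : Int) p.1)
      else
        let p := pvGet (i / 2) memo
        let q := pvGet (i / 2 + 1) p.2
        (p.1 + q.1, q.2.insert (i : Int) (p.1 + q.1))
  termination_by i
  decreasing_by all_goals omega

-- max(get(i) for i in range(n+1)): fold threading the memo and an Option-valued best
-- (none = nothing seen yet; here n ≥ 2 so the generator is nonempty and .getD 0 is never the default).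
-- i.toNat is exact: every i produced by range(0, n+1) is nonnegative.
def solution_1112_5_alt (n : Int) : Int :=
  if n ≤ 1 then n
  else
    let s := (PySem.List.pyRange 0 (n + 1) 1).foldl
      (fun (st : Option Int × PySem.Dict Int Int) i =>
        let p := pvGet i.toNat st.2
        (some (match st.1 with | none => p.1 | some b => max b p.1), p.2))
      (none, PySem.Dict.mk [])
    s.1.getD 0

-- ===== PRECONDITION & SPEC =====
def Spec_solution_1112_5 (n : Int) (out : Int) : Prop := out = solution_1112_5_alt n
instance (n : Int) (out : Int) : Decidable (Spec_solution_1112_5 n out) := by unfold Spec_solution_1112_5; infer_instance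

-- ===== CLAIM (what is proved, stated in full; the proofs are below) =====
def Claim_equal_solution_1112_5 : Prop := ∀ (n : Int), Dom_solution_1112_5 n → Spec_solution_1112_5 n (solution_1112_5 n)

-- ===== LEMMAS AND PROOFS =====

-- The mathematical sequence both programs compute.
def pvG (i : Nat) : Int :=
  if _h : i < 2 then (i : Int)
  else if i % 2 = 0 then pvG (i / 2)
  else pvG (i / 2) + pvG (i / 2 + 1)
  termination_by i
  decreasing_by all_goals omega

-- Running max of pvG over 1..m.
def pvM : Nat → Int
  | 0 => 1
  | (m + 1) => max (pvM m) (pvG (m + 1))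

-- memo invariant: every stored entry is correct
def pvInv (memo : PySem.Dict Int Int) : Prop :=
  ∀ i : Nat, ∀ v : Int, memo.get? (i : Int) = some v → v = pvG i

theorem pvG_lt_two (i : Nat) (h : i < 2) : pvG i = (i : Int) := by
  rw [pvG, dif_pos h]

theorem pvG_even (i : Nat) (h2 : ¬ i < 2) (he : i % 2 = 0) : pvG i = pvG (i / 2) := by
  rw [pvG, dif_neg h2, if_pos he]

theorem pvG_odd (i : Nat) (h2 : ¬ i < 2) (ho : ¬ i % 2 = 0) :
    pvG i = pvG (i / 2) + pvG (i / 2 + 1) := by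
  rw [pvG, dif_neg h2, if_neg ho]

theorem pvGet_correct (i : Nat) :
    ∀ memo : PySem.Dict Int Int, pvInv memo →
      (pvGet i memo).1 = pvG i ∧ pvInv (pvGet i memo).2 := by
  induction i using Nat.strong_induction_on with
  | _ i ih =>
    intro memo hinv
    rw [pvGet]
    by_cases h : i < 2
    · rw [dif_pos h]
      exact ⟨(pvG_lt_two i h).symm, hinv⟩
    · rw [dif_neg h]
      cases hm : memo.get? (i : Int) with
      | some v =>
        exact ⟨hinv i v hm, hinv⟩
      | none =>
        by_cases he : i % 2 = 0
        · rw [if_pos he]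
          obtain ⟨hv, hi⟩ := ih (i / 2) (by omega) memo hinv
          refine ⟨by simpa [hv] using (pvG_even i h he).symm, ?_⟩
          intro j v hj
          rw [PySem.Dict.get?_insert] at hj
          split at hj
          · rename_i hji
            have : j = i := by exact_mod_cast hji
            subst this
            cases hj
            rw [hv, ← pvG_even j h he]
          · exact hi j v hj
        · rw [if_neg he]
          obtain ⟨hv1, hi1⟩ := ih (i / 2) (by omega) memo hinv
          obtain ⟨hv2, hi2⟩ := ih (i / 2 + 1) (by omega) _ hi1
          refine ⟨by simp only [hv1, hv2]; exact (pvG_odd i h he).symm, ?_⟩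
          intro j v hj
          rw [PySem.Dict.get?_insert] at hj
          split at hj
          · rename_i hji
            have : j = i := by exact_mod_cast hji
            subst this
            cases hj
            rw [hv1, hv2, ← pvG_odd j h he]
          · exact hi2 j v hj

-- A's fold over range(2, m+1) yields exactly (map pvG (range (m+1)), pvM m), for 1 ≤ m.
theorem pvA_fold (m : Nat) (hm : 1 ≤ m) :
    (PySem.List.pyRange 2 ((m : Int) + 1) 1).foldl
      (fun (st : List Int × Int) k =>
        let v : Int :=
          if PySem.Int.mod k 2 = 0 then
            st.1.getD (PySem.Int.floordiv k 2).toNat 0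
          else
            st.1.getD (PySem.Int.floordiv k 2).toNat 0 +
              st.1.getD ((PySem.Int.floordiv k 2) + 1).toNat 0
        (st.1 ++ [v], max st.2 v))
      ([0, 1], 1)
    = ((List.range (m + 1)).map pvG, pvM m) := by
  induction m, hm using Nat.le_induction with
  | base =>
    rw [show ((1 : Nat) : Int) + 1 = 2 by norm_num,
        PySem.List.pyRange_one_eq_nil (le_refl 2)]
    simp [List.range_succ, pvM, pvG_lt_two 0 (by omega), pvG_lt_two 1 (by omega)]
  | succ m hm ih =>
    rw [show (((m + 1 : Nat)) : Int) + 1 = ((m : Int) + 1) + 1 by push_cast; ring,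
        PySem.List.pyRange_one_succ_right (by omega), List.foldl_append, ih]
    simp only [List.foldl_cons, List.foldl_nil]
    have hcast : (m : Int) + 1 = ((m + 1 : Nat) : Int) := by push_cast; ring
    rw [hcast]
    have hfd : PySem.Int.floordiv ((m + 1 : Nat) : Int) 2 = (((m + 1) / 2 : Nat) : Int) := by
      exact_mod_cast PySem.Int.floordiv_natCast (m + 1) 2
    have hmod : PySem.Int.mod ((m + 1 : Nat) : Int) 2 = (((m + 1) % 2 : Nat) : Int) := by
      exact_mod_cast PySem.Int.mod_natCast (m + 1) 2
    rw [hfd, hmod]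
    have hplus : (((m + 1) / 2 : Nat) : Int) + 1 = (((m + 1) / 2 + 1 : Nat) : Int) := by
      push_cast; ring
    rw [hplus]
    simp only [Int.toNat_natCast]
    by_cases he : (m + 1) % 2 = 0
    · rw [if_pos (by exact_mod_cast congrArg (Nat.cast : Nat → Int) he)]
      simp only [PySem.List.getD_map_range pvG (m + 1) ((m + 1) / 2) 0 (by omega)]
      rw [← pvG_even (m + 1) (by omega) he]
      simp [pvM, List.range_succ]
    · rw [if_neg (by
        intro hc
        exact he (by exact_mod_cast hc))]
      simp only [PySem.List.getD_map_range pvG (m + 1) ((m + 1) / 2) 0 (by omega),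
        PySem.List.getD_map_range pvG (m + 1) ((m + 1) / 2 + 1) 0 (by omega)]
      rw [← pvG_odd (m + 1) (by omega) he]
      simp [pvM, List.range_succ]

-- B's fold over range(0, m+1) yields best = pvM m and a correct memo, for 1 ≤ m.
theorem pvB_fold (m : Nat) (hm : 1 ≤ m) :
    ∃ memo, (PySem.List.pyRange 0 ((m : Int) + 1) 1).foldl
      (fun (st : Option Int × PySem.Dict Int Int) i =>
        let p := pvGet i.toNat st.2
        (some (match st.1 with | none => p.1 | some b => max b p.1), p.2))
      (none, PySem.Dict.mk [])
    = (some (pvM m), memo) ∧ pvInv memo := by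
  induction m, hm using Nat.le_induction with
  | base =>
    have hinv0 : pvInv (PySem.Dict.mk ([] : List (Int × Int))) := by
      intro j v hj
      simp [PySem.Dict.get?] at hj
    rw [show ((1 : Nat) : Int) + 1 = 2 by norm_num,
        PySem.List.pyRange_one_cons (by norm_num),
        show (0 : Int) + 1 = 1 by norm_num,
        PySem.List.pyRange_one_cons (by norm_num),
        PySem.List.pyRange_one_eq_nil (by norm_num)]
    simp only [List.foldl_cons, List.foldl_nil]
    obtain ⟨h0, i0⟩ := pvGet_correct 0 _ hinv0
    obtain ⟨h1, i1⟩ := pvGet_correct 1 _ i0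
    refine ⟨_, ?_, i1⟩
    simp only [Int.toNat_zero, Int.toNat_one] at *
    rw [h0, h1, pvG_lt_two 0 (by omega), pvG_lt_two 1 (by omega)]
    simp [pvM, pvG_lt_two 1 (by omega)]
  | succ m hm ih =>
    obtain ⟨memo, hfold, hinv⟩ := ih
    rw [show (((m + 1 : Nat)) : Int) + 1 = ((m : Int) + 1) + 1 by push_cast; ring,
        PySem.List.pyRange_one_succ_right (by omega), List.foldl_append, hfold]
    simp only [List.foldl_cons, List.foldl_nil]
    obtain ⟨hv, hi⟩ := pvGet_correct ((m : Int) + 1).toNat memo hinv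
    refine ⟨_, ?_, hi⟩
    have ht : ((m : Int) + 1).toNat = m + 1 := by omega
    rw [ht] at hv ⊢
    rw [hv]
    rfl

-- ===== VERDICT (by name: the statement is the Claim_ definition above) =====
theorem solution_1112_5_spec : Claim_equal_solution_1112_5 := by
  intro n _
  unfold Spec_solution_1112_5 solution_1112_5 solution_1112_5_alt
  by_cases h : n ≤ 1
  · rw [if_pos h, if_pos h]
  · rw [if_neg h, if_neg h]
    have h0 : 0 ≤ n := by omega
    lift n to ℕ using h0 with m
    have hm : 1 ≤ m := by exact_mod_cast (by omega : (1 : Int) ≤ (m : Int))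
    obtain ⟨memo, hB, _⟩ := pvB_fold m hm
    rw [pvA_fold m hm, hB]
    rfl
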